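-- pv_equiv track=rewrite | github.com/AbdulRehman457/pythonbootcamp2 | complete week1 assignment.py | are_strings_balanced
-- ===== SOURCE A (Python) =====
-- def are_strings_balanced(s1, s2):
--     t1 = {}
--     t2 = {}
--
--     for char in s1:
--         t1[char] = t1.get(char, 0) + 1
--
--     for char in s2:
--         t2[char] = t2.get(char, 0) + 1
--
--     # Check if all characters in s1 are present in s2
--     for char, count in t1.items():
--         if char not in t2:
--             return False
--     return True
-- ===== SOURCE B (Python) =====
-- def are_strings_balanced(s1, s2):
--     a = sorted(set(s1))
--     b = sorted(set(s2))
--     i = j = 0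
--     while i < len(a):
--         if j == len(b):
--             return False
--         if a[i] == b[j]:
--             i += 1
--             j += 1
--         elif a[i] > b[j]:
--             j += 1
--         else:
--             return False
--     return True
-- ===== Notes on version B (the rewrite author's own statement) =====
-- stated objective: alternative
-- what changed: Replaces the two frequency-dict building loops and the dict-membership check loop with a sort-and-merge: both strings' distinct characters are sorted and a single two-pointer merge scan decides containment.
import Mathlib
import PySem

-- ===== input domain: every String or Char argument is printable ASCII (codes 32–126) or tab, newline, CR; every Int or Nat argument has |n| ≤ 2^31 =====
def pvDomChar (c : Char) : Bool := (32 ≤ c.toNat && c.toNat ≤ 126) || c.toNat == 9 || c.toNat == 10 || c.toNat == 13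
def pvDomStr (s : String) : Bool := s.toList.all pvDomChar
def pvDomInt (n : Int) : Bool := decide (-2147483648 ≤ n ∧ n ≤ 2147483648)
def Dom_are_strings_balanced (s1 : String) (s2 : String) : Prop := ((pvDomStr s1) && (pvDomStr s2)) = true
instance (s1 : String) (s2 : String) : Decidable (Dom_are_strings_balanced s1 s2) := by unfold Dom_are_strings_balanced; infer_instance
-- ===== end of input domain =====

-- B replaces the count-dict loops and the dict-membership check with sort-then-merge:
-- sorted distinct characters of both strings, one two-pointer scan; objective: alternative.

-- ===== PORT A =====
-- the early-return loop 'for char, count in t1.items(): if char not in t2: return False'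
def pvCheckA : List (Char × Int) → PySem.Dict Char Int → Bool
  | [], _ => true
  | (c, _) :: rest, t2 => if t2.contains c then pvCheckA rest t2 else false

def are_strings_balanced (s1 : String) (s2 : String) : Bool :=
  let t1 := s1.toList.foldl (fun d c => d.insert c (d.getD c (0:Int) + 1)) PySem.Dict.empty
  let t2 := s2.toList.foldl (fun d c => d.insert c (d.getD c (0:Int) + 1)) PySem.Dict.empty
  pvCheckA t1.items t2

-- ===== PORT B =====
-- the two-pointer while loop, as recursion on the two sorted lists
def pvMerge : List Char → List Char → Bool
  | [], _ => true
  | _ :: _, [] => false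
  | x :: xs, y :: ys =>
      if x = y then pvMerge xs ys
      else if y < x then pvMerge (x :: xs) ys
      else false
termination_by a b => a.length + b.length

def are_strings_balanced_alt (s1 : String) (s2 : String) : Bool :=
  pvMerge (PySem.List.sorted (PySem.Set.ofList s1.toList) (fun c => c) false)
          (PySem.List.sorted (PySem.Set.ofList s2.toList) (fun c => c) false)

-- ===== PRECONDITION & SPEC =====
def Spec_are_strings_balanced (s1 : String) (s2 : String) (out : Bool) : Prop := out = are_strings_balanced_alt s1 s2
instance (s1 : String) (s2 : String) (out : Bool) : Decidable (Spec_are_strings_balanced s1 s2 out) := by unfold Spec_are_strings_balanced; infer_instance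

-- ===== CLAIM =====
def Claim_equal_are_strings_balanced : Prop := ∀ (s1 : String) (s2 : String), Dom_are_strings_balanced s1 s2 → Spec_are_strings_balanced s1 s2 (are_strings_balanced s1 s2)

-- ===== LEMMAS AND PROOFS =====

theorem pvCheckA_eq_all (l : List (Char × Int)) (d : PySem.Dict Char Int) :
    pvCheckA l d = l.all (fun p => d.contains p.1) := by
  induction l with
  | nil => rfl
  | cons p rest ih =>
    obtain ⟨c, n⟩ := p
    by_cases h : d.contains c = true <;> simp [pvCheckA, ih, h]

theorem are_strings_balanced_true_iff (s1 s2 : String) :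
    are_strings_balanced s1 s2 = true ↔ ∀ c ∈ s1.toList, c ∈ s2.toList := by
  unfold are_strings_balanced
  rw [pvCheckA_eq_all]
  have hk1 : (s1.toList.foldl (fun d c => d.insert c (d.getD c (0:Int) + 1)) PySem.Dict.empty).keys
      = PySem.Set.ofList s1.toList := by
    rw [PySem.Dict.keys_foldl_insert]
    simp [PySem.Dict.empty, PySem.Dict.keys, PySem.Set.update_nil_left]
  have hk2 : (s2.toList.foldl (fun d c => d.insert c (d.getD c (0:Int) + 1)) PySem.Dict.empty).keys
      = PySem.Set.ofList s2.toList := by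
    rw [PySem.Dict.keys_foldl_insert]
    simp [PySem.Dict.empty, PySem.Dict.keys, PySem.Set.update_nil_left]
  constructor
  · intro h c hc
    rw [List.all_eq_true] at h
    have hmem : c ∈ (s1.toList.foldl (fun d c => d.insert c (d.getD c (0:Int) + 1)) PySem.Dict.empty).keys := by
      rw [hk1, PySem.Set.mem_ofList]; exact hc
    rw [PySem.Dict.keys, List.mem_map] at hmem
    obtain ⟨p, hp, hpc⟩ := hmem
    have := h p hp
    rw [PySem.Dict.contains_eq_decide_mem_keys] at this
    simp [hk2, PySem.Set.mem_ofList] at this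
    rw [hpc] at this
    exact this
  · intro h
    rw [List.all_eq_true]
    intro p hp
    have hmem : p.1 ∈ (s1.toList.foldl (fun d c => d.insert c (d.getD c (0:Int) + 1)) PySem.Dict.empty).keys := by
      rw [PySem.Dict.keys, List.mem_map]; exact ⟨p, hp, rfl⟩
    rw [hk1, PySem.Set.mem_ofList] at hmem
    rw [PySem.Dict.contains_eq_decide_mem_keys]
    simp [hk2, PySem.Set.mem_ofList]
    exact h _ hmem

-- merge on strictly increasing lists decides containment
theorem pvMerge_iff (b a : List Char) (ha : a.Pairwise (· < ·)) (hb : b.Pairwise (· < ·)) :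
    pvMerge a b = true ↔ ∀ x ∈ a, x ∈ b := by
  induction b generalizing a with
  | nil =>
    cases a with
    | nil => simp [pvMerge]
    | cons x xs =>
      simp only [pvMerge, Bool.false_eq_true, false_iff]
      intro h
      exact absurd (h x List.mem_cons_self) (List.not_mem_nil)
  | cons y ys ih =>
    cases a with
    | nil => simp [pvMerge]
    | cons x xs =>
      have hxxs : ∀ z ∈ xs, x < z := fun z hz => List.rel_of_pairwise_cons ha hz
      have hyys : ∀ z ∈ ys, y < z := fun z hz => List.rel_of_pairwise_cons hb hz
      by_cases hxy : x = y
      · subst hxy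
        rw [show pvMerge (x :: xs) (x :: ys) = pvMerge xs ys from by simp [pvMerge]]
        rw [ih xs ha.of_cons hb.of_cons]
        constructor
        · intro h z hz
          rcases List.mem_cons.mp hz with rfl | hm
          · exact List.mem_cons_self
          · exact List.mem_cons_of_mem _ (h z hm)
        · intro h z hz
          rcases List.mem_cons.mp (h z (List.mem_cons_of_mem _ hz)) with rfl | hm
          · exact absurd (hxxs z hz) (lt_irrefl z)
          · exact hm
      · by_cases hyx : y < x
        · rw [show pvMerge (x :: xs) (y :: ys) = pvMerge (x :: xs) ys from by
            simp [pvMerge, hxy, hyx]]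
          rw [ih (x :: xs) ha hb.of_cons]
          constructor
          · intro h z hz
            exact List.mem_cons_of_mem _ (h z hz)
          · intro h z hz
            rcases List.mem_cons.mp (h z hz) with rfl | hm
            · rcases List.mem_cons.mp hz with rfl | hm2
              · exact absurd hyx (lt_irrefl z)
              · exact absurd (lt_trans hyx (hxxs z hm2)) (lt_irrefl z)
            · exact hm
        · rw [show pvMerge (x :: xs) (y :: ys) = false from by simp [pvMerge, hxy, hyx]]
          simp only [Bool.false_eq_true, false_iff]
          intro h
          rcases List.mem_cons.mp (h x List.mem_cons_self) with hxy' | hm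
          · exact hxy hxy'
          · have := hyys x hm
            exact hyx this

theorem are_strings_balanced_alt_true_iff (s1 s2 : String) :
    are_strings_balanced_alt s1 s2 = true ↔ ∀ c ∈ s1.toList, c ∈ s2.toList := by
  unfold are_strings_balanced_alt
  rw [pvMerge_iff _ _ (PySem.List.sorted_ofList_pairwise_lt s1.toList) (PySem.List.sorted_ofList_pairwise_lt s2.toList)]
  constructor
  · intro h c hc
    have := h c (by rw [PySem.List.mem_sorted, PySem.Set.mem_ofList]; exact hc)
    rwa [PySem.List.mem_sorted, PySem.Set.mem_ofList] at this
  · intro h c hc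
    rw [PySem.List.mem_sorted, PySem.Set.mem_ofList] at hc ⊢
    exact h c hc

-- ===== VERDICT =====
theorem are_strings_balanced_spec : Claim_equal_are_strings_balanced := by
  intro s1 s2 _
  unfold Spec_are_strings_balanced
  rw [Bool.eq_iff_iff, are_strings_balanced_true_iff, are_strings_balanced_alt_true_iff]
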